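-- pv_equiv track=rewrite | github.com/aloix123/Korepetycje | informator/74/zad74.py | zad1
-- ===== SOURCE A (Python) =====
-- def zad1(passwords):
--     nums=[str(x) for x in range(0,10)]
--     resultcount=0
--     for line in passwords:
--         indexcount=0
--         for element in line:
--             if element  in nums:
--                 indexcount+=1
--         if indexcount==len(line):
--             resultcount+=1
--     return resultcount
-- ===== SOURCE B (Python) =====
-- def zad1(passwords):
--     count = 0
--     for line in passwords:
--         if not line or ('0' <= min(line) and max(line) <= '9'):
--             count += 1
--     return count
-- ===== Notes on version B (the rewrite author's own statement) =====
-- stated objective: alternative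
-- what changed: B tests 'all characters are digits' by order statistics -- a line qualifies iff it is empty or min(line) >= '0' and max(line) <= '9' (digits are a contiguous code range) -- instead of A's per-character membership counting against a rebuilt list of digit strings compared to the line length.
import Mathlib
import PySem

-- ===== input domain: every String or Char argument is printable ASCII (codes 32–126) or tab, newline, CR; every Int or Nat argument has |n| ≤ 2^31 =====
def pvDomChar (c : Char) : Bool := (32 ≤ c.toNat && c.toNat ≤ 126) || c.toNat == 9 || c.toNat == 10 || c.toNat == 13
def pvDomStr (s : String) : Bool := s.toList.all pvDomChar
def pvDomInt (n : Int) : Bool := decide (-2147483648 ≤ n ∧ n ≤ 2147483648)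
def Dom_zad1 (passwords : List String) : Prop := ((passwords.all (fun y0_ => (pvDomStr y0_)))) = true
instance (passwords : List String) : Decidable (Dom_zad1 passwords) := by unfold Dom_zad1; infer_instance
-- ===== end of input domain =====

-- B decides 'all characters are digits' by order statistics (empty, or min ≥ '0' and max ≤ '9',
-- since digits are a contiguous code range) instead of A's per-character membership counting (alternative).

-- ===== PORT A =====
def zad1 (passwords : List String) : Int :=
  let nums : List String := (PySem.List.pyRange 0 10 1).map PySem.Int.toStr
  passwords.foldl (fun resultcount line =>
    let indexcount : Int := line.toList.foldl
      (fun ic element => if nums.contains (String.singleton element) then ic + 1 else ic) 0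
    if indexcount = PySem.Str.len line then resultcount + 1 else resultcount) 0

-- ===== PORT B =====
def zad1_alt (passwords : List String) : Int :=
  passwords.foldl (fun count line =>
    let cs := line.toList
    if cs.isEmpty ||
        (match PySem.List.min? cs (fun c => c), PySem.List.max? cs (fun c => c) with
         | some m, some M => decide ('0' ≤ m) && decide (M ≤ '9')
         | _, _ => false)
    then count + 1 else count) 0

-- ===== PRECONDITION & SPEC =====
def Spec_zad1 (passwords : List String) (out : Int) : Prop := out = zad1_alt passwords
instance (passwords : List String) (out : Int) : Decidable (Spec_zad1 passwords out) := by unfold Spec_zad1; infer_instance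

-- ===== CLAIM (what is proved, stated in full; the proofs are below) =====
def Claim_equal_zad1 : Prop := ∀ (passwords : List String), Dom_zad1 passwords → Spec_zad1 passwords (zad1 passwords)

-- ===== LEMMAS AND PROOFS =====

theorem zad1_nums_eval :
    (PySem.List.pyRange 0 10 1).map PySem.Int.toStr
      = ["0","1","2","3","4","5","6","7","8","9"] := by decide

theorem zad1_singleton_inj (c d : Char) (h : String.singleton c = String.singleton d) : c = d := by
  have := congrArg String.toList h
  simpa [String.singleton] using this

theorem zad1_char_test (c : Char) :
    (["0","1","2","3","4","5","6","7","8","9"] : List String).contains (String.singleton c)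
      = true ↔ ('0' ≤ c ∧ c ≤ '9') := by
  rw [List.contains_iff_mem]
  rw [show (["0","1","2","3","4","5","6","7","8","9"] : List String)
        = (['0','1','2','3','4','5','6','7','8','9'].map String.singleton) from rfl]
  constructor
  · intro h
    obtain ⟨a, ha, hae⟩ := List.mem_map.mp h
    obtain rfl := zad1_singleton_inj a c hae
    fin_cases ha <;> exact ⟨by decide, by decide⟩
  · rintro ⟨h0, h9⟩
    have hlo : 48 ≤ c.toNat := h0
    have hhi : c.toNat ≤ 57 := h9
    have : c = Char.ofNat c.toNat := (Char.ofNat_toNat c).symm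
    interval_cases h : c.toNat <;>
      · rw [this]; decide
  
theorem zad1_inner_count (p : Char → Bool) (l : List Char) (a : Int) :
    l.foldl (fun ic c => if p c then ic + 1 else ic) a = a + l.countP p := by
  induction l generalizing a with
  | nil => simp
  | cons x xs ih =>
      by_cases h : p x
      · simp [h, ih]; ring
      · simp [h, ih]

theorem zad1_line_cond (cs : List Char) :
    (cs.foldl
        (fun ic c => if (["0","1","2","3","4","5","6","7","8","9"] : List String).contains (String.singleton c) then ic + 1 else ic) 0
        = (cs.length : Int))
      ↔ ((cs.isEmpty ||
        (match PySem.List.min? cs (fun c => c), PySem.List.max? cs (fun c => c) with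
         | some m, some M => decide ('0' ≤ m) && decide (M ≤ '9')
         | _, _ => false)) = true) := by
  rw [zad1_inner_count, zero_add, Nat.cast_inj, List.countP_eq_length]
  constructor
  · intro h
    cases hcs : cs with
    | nil => simp
    | cons x t =>
        obtain ⟨m, hm⟩ := Option.ne_none_iff_exists'.mp
          (fun hn => by simpa [hcs] using (PySem.List.min?_eq_none_iff (xs := cs) (key := fun c => c)).mp hn)
        obtain ⟨M, hM⟩ := Option.ne_none_iff_exists'.mp
          (fun hn => by simpa [hcs] using (PySem.List.max?_eq_none_iff (xs := cs) (key := fun c => c)).mp hn)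
        rw [← hcs]
        simp only [hm, hM]
        have h1 := (zad1_char_test m).mp (h m (PySem.List.min?_mem hm))
        have h2 := (zad1_char_test M).mp (h M (PySem.List.max?_mem hM))
        simp [h1.1, h2.2]
  · intro h c hc
    rw [zad1_char_test]
    cases hcs : cs with
    | nil => simp [hcs] at hc
    | cons x t =>
        rw [hcs] at h
        simp only [List.isEmpty_cons, Bool.false_or] at h
        obtain ⟨m, hm⟩ := Option.ne_none_iff_exists'.mp
          (fun hn => by simpa using (PySem.List.min?_eq_none_iff (xs := x :: t) (key := fun c => c)).mp hn)
        obtain ⟨M, hM⟩ := Option.ne_none_iff_exists'.mp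
          (fun hn => by simpa using (PySem.List.max?_eq_none_iff (xs := x :: t) (key := fun c => c)).mp hn)
        rw [hm, hM] at h
        simp only [Bool.and_eq_true, decide_eq_true_eq] at h
        rw [hcs] at hc
        exact ⟨le_trans h.1 (PySem.List.min?_isMin hm c hc),
               le_trans (PySem.List.max?_isMax hM c hc) h.2⟩

-- ===== VERDICT (by name: the statement is the Claim_ definition above) =====
theorem zad1_spec : Claim_equal_zad1 := by
  intro passwords _
  unfold Spec_zad1 zad1 zad1_alt
  rw [zad1_nums_eval]
  refine PySem.List.foldl_congr_mem _ _ _ _ ?_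
  intro acc line _
  simp only [PySem.Str.len_eq]
  exact if_congr (by rw [zad1_line_cond]) rfl rfl
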